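-- pv_equiv track=rewrite | github.com/1m188/algorithm | nowcoder/华为机试/HJ18 识别有效的IP地址和掩码并进行分类统计.py | isMaskLegal
-- ===== SOURCE A (Python) =====
-- def isIPLegal(ip: str) -> bool:
--     '''
--     判断ip是否合法
--     '''
--     ipli = ip.split('.')
--     if len(ipli) != 4: return False
--     if '' in ipli: return False
--     for i in ipli:
--         i = int(i)
--         if not (i >= 0 and i <= 255): return False
--     return True
--
-- def isMaskLegal(mask: str) -> bool:
--     '''
--     判断掩码是否合法
--     '''
--     if not isIPLegal(mask): return False
--     maskli = mask.split('.')
--     mask_bin = ''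
--     for i in maskli:
--         x = bin(int(i))[2:]
--         while len(x) < 8:  # 这里很重要！！！注意每小节的二进制要补足8位，其最大值到255
--             x = '0' + x
--         mask_bin += x
--     if mask_bin[0] != '1' or mask_bin[-1] != '0': return False  # 全1或全0非法
--     return '01' not in mask_bin  # 只需查找 01 是否在序列之中即可
-- ===== SOURCE B (Python) =====
-- def isIPLegal(ip: str) -> bool:
--     '''
--     判断ip是否合法
--     '''
--     ipli = ip.split('.')
--     if len(ipli) != 4: return False
--     if '' in ipli: return False
--     for i in ipli:
--         i = int(i)
--         if not (i >= 0 and i <= 255): return False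
--     return True
--
-- # the 31 valid masks: k leading ones then zeros, 1 <= k <= 31
-- VALID_MASKS = [2 ** 32 - 2 ** k for k in range(1, 32)]
--
-- def isMaskLegal(mask: str) -> bool:
--     '''
--     判断掩码是否合法
--     '''
--     if not isIPLegal(mask): return False
--     a, b, c, d = (int(x) for x in mask.split('.'))
--     m = ((a * 256 + b) * 256 + c) * 256 + d
--     return m in VALID_MASKS
-- ===== Notes on version B (the rewrite author's own statement) =====
-- stated objective: idiomatic
-- what changed: Instead of building a 32-char binary string and scanning it for a zero-then-one substring, B keeps isIPLegal, packs the four octets into one 32-bit integer and checks membership in the precomputed table of the 31 valid masks (2^32 - 2^k, k=1..31).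
import Mathlib
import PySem

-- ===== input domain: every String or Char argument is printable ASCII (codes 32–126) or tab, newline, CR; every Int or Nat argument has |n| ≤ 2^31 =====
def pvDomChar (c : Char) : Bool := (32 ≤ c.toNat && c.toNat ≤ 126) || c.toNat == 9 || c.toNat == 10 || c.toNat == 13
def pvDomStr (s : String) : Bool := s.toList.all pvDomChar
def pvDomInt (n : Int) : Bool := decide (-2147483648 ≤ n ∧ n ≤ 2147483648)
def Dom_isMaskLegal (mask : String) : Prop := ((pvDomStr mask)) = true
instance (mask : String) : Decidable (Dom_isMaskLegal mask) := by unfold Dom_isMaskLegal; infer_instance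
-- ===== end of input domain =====

-- B replaces A's 32-char binary-string build and substring search by packing the four
-- octets into one integer and looking it up in the precomputed table of the 31 valid masks
-- (objective: idiomatic; return value only, neither program mutates anything).

-- ===== PORT A =====

-- the for-loop of isIPLegal; int(i) raises ValueError exactly where ofChars? is none (excluded by Pre_)
def pvIpLoop : List (List Char) → Bool
  | [] => true
  | p :: rest =>
    match PySem.Int.ofChars? p with
    | none => false   -- unreachable under Pre_isMaskLegal (int(i) raises here in Python)
    | some v => if 0 ≤ v ∧ v ≤ 255 then pvIpLoop rest else false

def pvIsIPLegal (ip : List Char) : Bool :=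
  let ipli := PySem.Chars.splitOn ip ['.']
  if ipli.length ≠ 4 then false
  else if [] ∈ ipli then false
  else pvIpLoop ipli

-- `while len(x) < 8: x = '0' + x`; each pass prepends one char, so fuel 8 always covers the loop
def pvPadGo : Nat → List Char → List Char
  | 0, x => x
  | k+1, x => if x.length < 8 then pvPadGo k ('0' :: x) else x

-- x = bin(int(i))[2:], then the padding loop
def pvBlock (v : Int) : List Char :=
  pvPadGo 8 (PySem.List.slice (PySem.Int.toBinChars0b v) (some 2) none)

def isMaskLegal (mask : String) : Bool :=
  if !pvIsIPLegal mask.toList then false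
  else
    let maskli := PySem.Chars.splitOn mask.toList ['.']
    -- mask_bin += x; int(i) cannot raise here (pvIsIPLegal already parsed every octet), so getD 0 is dead
    let mask_bin := maskli.foldl (fun acc p => acc ++ pvBlock ((PySem.Int.ofChars? p).getD 0)) []
    if PySem.List.pyGet? mask_bin 0 ≠ some '1' ∨ PySem.List.pyGet? mask_bin (-1) ≠ some '0' then false
    else !PySem.Chars.isIn ['0', '1'] mask_bin

-- ===== PORT B =====

-- VALID_MASKS = [2**32 - 2**k for k in range(1, 32)]  (k ∈ 1..31, so k.toNat is exact)
def pvValidMasks : List Int :=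
  (PySem.List.pyRange 1 32).map (fun k => 2 ^ 32 - 2 ^ k.toNat)

def isMaskLegal_alt (mask : String) : Bool :=
  if !pvIsIPLegal mask.toList then false
  else
    let parts := PySem.Chars.splitOn mask.toList ['.']
    -- a, b, c, d = (int(x) for x in mask.split('.')): pvIsIPLegal passed, so there are exactly
    -- 4 parts and every int(x) returns a value (the getD defaults are dead)
    let oct := fun i => (PySem.Int.ofChars? (parts.getD i [])).getD 0
    let m := ((oct 0 * 256 + oct 1) * 256 + oct 2) * 256 + oct 3
    pvValidMasks.contains m

-- ===== PRECONDITION & SPEC =====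
-- Pre_ excludes exactly the inputs where A raises ValueError: a 4-part mask with no empty part
-- whose first non-parsing octet is preceded only by in-range octets (int() raises on it).
def Pre_isMaskLegal (mask : String) : Prop :=
  let parts := PySem.Chars.splitOn mask.toList ['.']
  parts.length = 4 → [] ∉ parts →
    ∀ k < parts.length, (PySem.Int.ofChars? (parts.getD k [])).isNone = true →
      ∃ j < k, (PySem.Int.ofChars? (parts.getD j [])).any (fun v => decide (v < 0 ∨ 255 < v)) = true
instance (mask : String) : Decidable (Pre_isMaskLegal mask) := by unfold Pre_isMaskLegal; infer_instance

def pvWitness_isMaskLegal : String := "255.255.0.0"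

def Spec_isMaskLegal (mask : String) (out : Bool) : Prop := out = isMaskLegal_alt mask
instance (mask : String) (out : Bool) : Decidable (Spec_isMaskLegal mask out) := by unfold Spec_isMaskLegal; infer_instance

-- ===== CLAIM (what is proved, stated in full; the proofs are below) =====
def Claim_equal_isMaskLegal : Prop := ∀ (mask : String), Dom_isMaskLegal mask → Pre_isMaskLegal mask → Spec_isMaskLegal mask (isMaskLegal mask)

-- ===== LEMMAS AND PROOFS =====

-- proof-only abbreviations
def pvB8 (n : Nat) : List Char := pvBlock (Int.ofNat n)

-- the 9 octet values whose 8-bit pattern contains no '01'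
def pvSL : List Nat := [0, 128, 192, 224, 240, 248, 252, 254, 255]

def pvValidMasksNat : List Nat := [4294967294, 4294967292, 4294967288, 4294967280, 4294967264, 4294967232, 4294967168, 4294967040, 4294966784, 4294966272,
  4294965248, 4294963200, 4294959104, 4294950912, 4294934528, 4294901760, 4294836224, 4294705152, 4294443008,
  4293918720, 4292870144, 4290772992, 4286578688, 4278190080, 4261412864, 4227858432, 4160749568, 4026531840,
  3758096384, 3221225472, 2147483648]

-- '01' occurs as a substring
def pvHas01 : List Char → Bool
  | c1 :: c2 :: rest => (c1 == '0' && c2 == '1') || pvHas01 (c2 :: rest)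
  | _ => false

lemma pvIpLoop_sound (l : List (List Char)) (h : pvIpLoop l = true) :
    ∀ p ∈ l, ∃ v, PySem.Int.ofChars? p = some v ∧ 0 ≤ v ∧ v ≤ 255 := by
  induction l with
  | nil => intro p hp; cases hp
  | cons q t ih =>
    intro p hp
    unfold pvIpLoop at h
    cases hq : PySem.Int.ofChars? q with
    | none => rw [hq] at h; cases h
    | some v =>
      rw [hq] at h
      by_cases hr : (0 ≤ v ∧ v ≤ 255)
      · simp only [] at h
        rw [if_pos hr] at h
        rcases List.mem_cons.mp hp with rfl | hp'
        · exact ⟨v, hq, hr⟩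
        · exact ih h p hp'
      · simp [hr] at h

lemma pvHas01_iff_infix (l : List Char) : pvHas01 l = true ↔ ['0', '1'] <:+: l := by
  induction l with
  | nil => simp [pvHas01]
  | cons c t ih =>
    rw [List.infix_cons_iff]
    cases t with
    | nil =>
      constructor
      · intro h; simp [pvHas01] at h
      · rintro (h | h)
        · simp [List.cons_prefix_cons] at h
        · simp at h
    | cons c2 t2 =>
      show ((c == '0' && c2 == '1') || pvHas01 (c2 :: t2)) = true ↔ _
      constructor
      · intro h
        rcases Bool.or_eq_true_iff.mp h with h | h
        · left
          simp only [Bool.and_eq_true, beq_iff_eq] at h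
          simp [List.cons_prefix_cons, h.1, h.2]
        · exact Or.inr (ih.mp h)
      · rintro (h | h)
        · obtain ⟨h1, h2⟩ := List.cons_prefix_cons.mp h
          obtain ⟨h3, _⟩ := List.cons_prefix_cons.mp h2
          apply Bool.or_eq_true_iff.mpr
          left; simp [h1.symm, h3.symm]
        · exact Bool.or_eq_true_iff.mpr (Or.inr (ih.mpr h))

lemma pvHas01_append (l1 l2 : List Char) :
    pvHas01 (l1 ++ l2) =
      (pvHas01 l1 || ((l1.getLast? == some '0') && (l2.head? == some '1')) || pvHas01 l2) := by
  induction l1 with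
  | nil => simp [pvHas01]
  | cons c t ih =>
    cases t with
    | nil =>
      cases l2 with
      | nil => simp [pvHas01]
      | cons d u => simp [pvHas01]
    | cons c2 t2 =>
      have h1 : pvHas01 (c :: c2 :: (t2 ++ l2)) = ((c == '0' && c2 == '1') || pvHas01 (c2 :: (t2 ++ l2))) := rfl
      have h2 : pvHas01 (c :: c2 :: t2) = ((c == '0' && c2 == '1') || pvHas01 (c2 :: t2)) := rfl
      have h3 : (c :: c2 :: t2) ++ l2 = c :: ((c2 :: t2) ++ l2) := rfl
      rw [h3, show (c :: (c2 :: t2 ++ l2) : List Char) = c :: c2 :: (t2 ++ l2) from rfl, h1,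
        show (pvHas01 (c2 :: (t2 ++ l2))) = pvHas01 ((c2 :: t2) ++ l2) from rfl, ih, h2]
      simp [List.getLast?_cons_cons, Bool.or_assoc]

set_option maxRecDepth 40000 in
lemma pvB8_len : ∀ n < 256, (pvB8 n).length = 8 := by decide
set_option maxRecDepth 40000 in
lemma pvB8_head : ∀ n < 256, ((pvB8 n).head? = some '1' ↔ 128 ≤ n) := by decide
set_option maxRecDepth 40000 in
lemma pvB8_last : ∀ n < 256, ((pvB8 n).getLast? = some '0' ↔ n % 2 = 0) := by decide
set_option maxRecDepth 40000 in
lemma pvB8_has01 : ∀ n < 256, (pvHas01 (pvB8 n) = false ↔ n ∈ pvSL) := by decide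

set_option maxRecDepth 10000 in
set_option maxHeartbeats 2000000 in
lemma pvValidMasks_eq : pvValidMasks = [4294967294, 4294967292, 4294967288, 4294967280, 4294967264, 4294967232, 4294967168, 4294967040, 4294966784, 4294966272,
  4294965248, 4294963200, 4294959104, 4294950912, 4294934528, 4294901760, 4294836224, 4294705152, 4294443008,
  4293918720, 4292870144, 4290772992, 4286578688, 4278190080, 4261412864, 4227858432, 4160749568, 4026531840,
  3758096384, 3221225472, 2147483648] := by decide

lemma pvMemInt (mN : Nat) : ((mN : Int) ∈ pvValidMasks ↔ mN ∈ pvValidMasksNat) := by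
  rw [pvValidMasks_eq]
  simp only [pvValidMasksNat, List.mem_cons, List.not_mem_nil, or_false]
  omega

lemma pvGet_zero {α : Type} (l : List α) : PySem.List.pyGet? l 0 = l.head? := by
  cases l <;> simp [PySem.List.pyGet?, PySem.List.pyIdx?]

lemma pvGet_neg_one {α : Type} (l : List α) (h : l ≠ []) : PySem.List.pyGet? l (-1) = l.getLast? := by
  have hn : 0 < l.length := List.length_pos_iff.mpr h
  have h1 : ¬ ((0:Int) ≤ -1) := by omega
  have h2 : -(l.length:Int) ≤ -1 := by omega
  simp only [PySem.List.pyGet?, PySem.List.pyIdx?, h1, if_false, h2, if_pos]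
  simp [List.getLast?_eq_getElem?]

lemma pvHead_append {α : Type} (l1 l2 : List α) (h : l1 ≠ []) : (l1 ++ l2).head? = l1.head? := by
  cases l1 with
  | nil => exact absurd rfl h
  | cons a t => simp

lemma pvLast_append {α : Type} (l1 l2 : List α) (h : l2 ≠ []) : (l1 ++ l2).getLast? = l2.getLast? := by
  rw [List.getLast?_append]
  cases hl : l2.getLast? with
  | none => exact absurd (List.getLast?_eq_none_iff.mp hl) h
  | some x => simp

lemma pvFwd : (pvSL.all fun n0 => pvSL.all fun n1 => pvSL.all fun n2 => pvSL.all fun n3 =>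
   (!(decide (128 ≤ n0) && (n3 % 2 == 0) && !(n0 % 2 == 0 && decide (128 ≤ n1)) && !(n1 % 2 == 0 && decide (128 ≤ n2)) && !(n2 % 2 == 0 && decide (128 ≤ n3)))) ||
   pvValidMasksNat.contains (((n0 * 256 + n1) * 256 + n2) * 256 + n3)) = true := by decide

lemma pvBwd (n0 n1 n2 n3 : Nat) (h1 : n1 < 256) (h2 : n2 < 256) (h3 : n3 < 256)
    (hm : ((n0 * 256 + n1) * 256 + n2) * 256 + n3 ∈ pvValidMasksNat) :
    (128 ≤ n0 ∧ n3 % 2 = 0 ∧ n0 ∈ pvSL ∧ n1 ∈ pvSL ∧ n2 ∈ pvSL ∧ n3 ∈ pvSL ∧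
       ¬(n0 % 2 = 0 ∧ 128 ≤ n1) ∧ ¬(n1 % 2 = 0 ∧ 128 ≤ n2) ∧ ¬(n2 % 2 = 0 ∧ 128 ≤ n3)) := by
  simp only [pvSL, List.mem_cons, List.not_mem_nil, or_false]
  simp only [pvValidMasksNat, List.mem_cons, List.not_mem_nil, or_false] at hm
  rcases hm with h|h|h|h|h|h|h|h|h|h|h|h|h|h|h|h|h|h|h|h|h|h|h|h|h|h|h|h|h|h|h <;> omega

lemma pvKeyNat (n0 n1 n2 n3 : Nat) (h1 : n1 < 256) (h2 : n2 < 256) (h3 : n3 < 256) :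
    ((128 ≤ n0 ∧ n3 % 2 = 0 ∧ n0 ∈ pvSL ∧ n1 ∈ pvSL ∧ n2 ∈ pvSL ∧ n3 ∈ pvSL ∧
       ¬(n0 % 2 = 0 ∧ 128 ≤ n1) ∧ ¬(n1 % 2 = 0 ∧ 128 ≤ n2) ∧ ¬(n2 % 2 = 0 ∧ 128 ≤ n3))
     ↔ ((n0 * 256 + n1) * 256 + n2) * 256 + n3 ∈ pvValidMasksNat) := by
  constructor
  · rintro ⟨ha, hd, m0, m1, m2, m3, b01, b12, b23⟩
    have t0 := List.all_eq_true.mp pvFwd n0 m0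
    have t1 := List.all_eq_true.mp t0 n1 m1
    have t2 := List.all_eq_true.mp t1 n2 m2
    have t3 := List.all_eq_true.mp t2 n3 m3
    rcases Bool.or_eq_true_iff.mp t3 with h | h
    · exfalso
      rw [Bool.not_eq_true'] at h
      simp only [Bool.and_eq_false_iff, Bool.not_eq_false', Bool.and_eq_true, beq_iff_eq,
        decide_eq_false_iff_not, decide_eq_true_eq, beq_eq_false_iff_ne, ne_eq] at h
      tauto
    · exact List.contains_iff_mem.mp h
  · intro hm; exact pvBwd n0 n1 n2 n3 h1 h2 h3 hm

lemma pvAcond (n0 n1 n2 n3 : Nat) (h0 : n0 < 256) (h1 : n1 < 256) (h2 : n2 < 256) (h3 : n3 < 256) :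
    ((if PySem.List.pyGet? (((pvB8 n0 ++ pvB8 n1) ++ pvB8 n2) ++ pvB8 n3) 0 ≠ some '1' ∨
         PySem.List.pyGet? (((pvB8 n0 ++ pvB8 n1) ++ pvB8 n2) ++ pvB8 n3) (-1) ≠ some '0' then false
      else !PySem.Chars.isIn ['0', '1'] (((pvB8 n0 ++ pvB8 n1) ++ pvB8 n2) ++ pvB8 n3)) = true)
    ↔ (128 ≤ n0 ∧ n3 % 2 = 0 ∧ n0 ∈ pvSL ∧ n1 ∈ pvSL ∧ n2 ∈ pvSL ∧ n3 ∈ pvSL ∧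
       ¬(n0 % 2 = 0 ∧ 128 ≤ n1) ∧ ¬(n1 % 2 = 0 ∧ 128 ≤ n2) ∧ ¬(n2 % 2 = 0 ∧ 128 ≤ n3)) := by
  have ne0 : pvB8 n0 ≠ [] := by
    intro hE; have := pvB8_len n0 h0; rw [hE] at this; simp at this
  have ne1 : pvB8 n1 ≠ [] := by
    intro hE; have := pvB8_len n1 h1; rw [hE] at this; simp at this
  have ne2 : pvB8 n2 ≠ [] := by
    intro hE; have := pvB8_len n2 h2; rw [hE] at this; simp at this
  have ne3 : pvB8 n3 ≠ [] := by
    intro hE; have := pvB8_len n3 h3; rw [hE] at this; simp at this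
  have neA : pvB8 n0 ++ pvB8 n1 ≠ [] := fun hE => ne0 (List.append_eq_nil_iff.mp hE).1
  have neB : (pvB8 n0 ++ pvB8 n1) ++ pvB8 n2 ≠ [] := fun hE => neA (List.append_eq_nil_iff.mp hE).1
  have nebin : ((pvB8 n0 ++ pvB8 n1) ++ pvB8 n2) ++ pvB8 n3 ≠ [] :=
    fun hE => ne3 (List.append_eq_nil_iff.mp hE).2
  have hhead : ((((pvB8 n0 ++ pvB8 n1) ++ pvB8 n2) ++ pvB8 n3)).head? = (pvB8 n0).head? := by
    rw [pvHead_append _ _ neB, pvHead_append _ _ neA, pvHead_append _ _ ne0]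
  have hlast : ((((pvB8 n0 ++ pvB8 n1) ++ pvB8 n2) ++ pvB8 n3)).getLast? = (pvB8 n3).getLast? :=
    pvLast_append _ _ ne3
  rw [pvGet_zero, pvGet_neg_one _ nebin, hhead, hlast]
  by_cases hc : ((pvB8 n0).head? ≠ some '1' ∨ (pvB8 n3).getLast? ≠ some '0')
  · rw [if_pos hc]
    simp only [Bool.false_eq_true, false_iff]
    rintro ⟨hA, hB, -⟩
    rcases hc with hc | hc
    · exact hc ((pvB8_head n0 h0).mpr hA)
    · exact hc ((pvB8_last n3 h3).mpr hB)
  · rw [if_neg hc]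
    obtain ⟨hH', hL'⟩ := not_or.mp hc
    have hH := not_not.mp hH'
    have hL := not_not.mp hL'
    have hA0 : 128 ≤ n0 := (pvB8_head n0 h0).mp hH
    have hD3 : n3 % 2 = 0 := (pvB8_last n3 h3).mp hL
    rw [Bool.not_eq_true', PySem.Chars.isIn_eq_false_iff, ← pvHas01_iff_infix, Bool.not_eq_true,
      pvHas01_append, pvHas01_append, pvHas01_append,
      pvLast_append _ _ ne2, pvLast_append _ _ ne1]
    simp only [Bool.or_eq_false_iff, Bool.and_eq_false_iff, beq_eq_false_iff_ne, ne_eq]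
    rw [pvB8_has01 n0 h0, pvB8_has01 n1 h1, pvB8_has01 n2 h2, pvB8_has01 n3 h3,
      pvB8_last n0 h0, pvB8_last n1 h1, pvB8_last n2 h2,
      pvB8_head n1 h1, pvB8_head n2 h2, pvB8_head n3 h3]
    constructor
    · rintro ⟨⟨⟨⟨⟨⟨hs0, hb01⟩, hs1⟩, hb12⟩, hs2⟩, hb23⟩, hs3⟩
      exact ⟨hA0, hD3, hs0, hs1, hs2, hs3,
        fun h => hb01.elim (fun a => a h.1) (fun a => a h.2),
        fun h => hb12.elim (fun a => a h.1) (fun a => a h.2),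
        fun h => hb23.elim (fun a => a h.1) (fun a => a h.2)⟩
    · rintro ⟨-, -, hs0, hs1, hs2, hs3, b01, b12, b23⟩
      exact ⟨⟨⟨⟨⟨⟨hs0, not_and_or.mp b01⟩, hs1⟩, not_and_or.mp b12⟩, hs2⟩, not_and_or.mp b23⟩, hs3⟩

lemma pvLen4 {α : Type} (l : List α) (h : l.length = 4) : ∃ a b c d, l = [a, b, c, d] := by
  match l, h with
  | [a, b, c, d], _ => exact ⟨a, b, c, d, rfl⟩

-- ===== VERDICT (by name: the statement is the Claim_ definition above) =====
theorem isMaskLegal_spec : Claim_equal_isMaskLegal := by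
  intro mask _hdom _hpre
  unfold Spec_isMaskLegal isMaskLegal isMaskLegal_alt
  by_cases hip : pvIsIPLegal mask.toList = true
  case neg =>
    rw [Bool.not_eq_true] at hip
    simp only [hip, Bool.not_false, if_true]
  case pos =>
    simp only [hip, Bool.not_true, Bool.false_eq_true, if_false]
    have hip' := hip
    unfold pvIsIPLegal at hip'
    set parts := PySem.Chars.splitOn mask.toList ['.'] with hparts
    by_cases h4 : parts.length = 4
    case neg => simp [h4] at hip'
    by_cases hni : ([] : List Char) ∈ parts
    case pos => simp [h4, hni] at hip'
    have hloop : pvIpLoop parts = true := by simpa [h4, hni] using hip'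
    obtain ⟨p0, p1, p2, p3, hps⟩ := pvLen4 parts h4
    rw [hps] at hloop
    obtain ⟨v0, hv0, hr0⟩ := pvIpLoop_sound _ hloop p0 (by simp)
    obtain ⟨v1, hv1, hr1⟩ := pvIpLoop_sound _ hloop p1 (by simp)
    obtain ⟨v2, hv2, hr2⟩ := pvIpLoop_sound _ hloop p2 (by simp)
    obtain ⟨v3, hv3, hr3⟩ := pvIpLoop_sound _ hloop p3 (by simp)
    have hc0 : v0 = ((v0.toNat : Nat) : Int) := (Int.toNat_of_nonneg hr0.1).symm
    have hc1 : v1 = ((v1.toNat : Nat) : Int) := (Int.toNat_of_nonneg hr1.1).symm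
    have hc2 : v2 = ((v2.toNat : Nat) : Int) := (Int.toNat_of_nonneg hr2.1).symm
    have hc3 : v3 = ((v3.toNat : Nat) : Int) := (Int.toNat_of_nonneg hr3.1).symm
    have hb0 : v0.toNat < 256 := by omega
    have hb1 : v1.toNat < 256 := by omega
    have hb2 : v2.toNat < 256 := by omega
    have hb3 : v3.toNat < 256 := by omega
    rw [hps]
    simp only [List.foldl_cons, List.foldl_nil, hv0, hv1, hv2, hv3, Option.getD_some,
      List.nil_append, List.getD_cons_zero, List.getD_cons_succ]
    rw [hc0, hc1, hc2, hc3]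
    rw [show pvBlock ((v0.toNat : Nat) : Int) = pvB8 v0.toNat from rfl,
        show pvBlock ((v1.toNat : Nat) : Int) = pvB8 v1.toNat from rfl,
        show pvBlock ((v2.toNat : Nat) : Int) = pvB8 v2.toNat from rfl,
        show pvBlock ((v3.toNat : Nat) : Int) = pvB8 v3.toNat from rfl]
    rw [Bool.eq_iff_iff]
    rw [pvAcond v0.toNat v1.toNat v2.toNat v3.toNat hb0 hb1 hb2 hb3]
    rw [pvKeyNat v0.toNat v1.toNat v2.toNat v3.toNat hb1 hb2 hb3]
    rw [show ((((v0.toNat : Int)) * 256 + (v1.toNat : Int)) * 256 + (v2.toNat : Int)) * 256 + (v3.toNat : Int)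
          = ((((v0.toNat * 256 + v1.toNat) * 256 + v2.toNat) * 256 + v3.toNat : Nat) : Int) from by push_cast; ring]
    rw [← pvMemInt]
    exact Iff.symm List.contains_iff_mem
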